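-- pv_equiv track=rewrite | github.com/MohanoSuke/Flight-Manager-Application | python ( temporaire)/final2.py | tabindice
-- ===== SOURCE A (Python) =====
-- def tabindice(tab,cpt):
--     """
--     entree/sortie tab : [int]
--     pré-cond : len(tab) >= 1
--     post-cond : rempli le tableau pourtoutes les cases du tableau soient égales à tab[indice]=indice
--     """
--     i=0
--     cpt+= 1
--     while i < len(tab):
--         tab[i]=i
--         i=i+1
--         cpt += 5
--     cpt += 5
--     return cpt
-- ===== SOURCE B (Python) =====
-- def tabindice(tab, cpt):
--     # Same in-place fill of tab (tab[i] = i) and identical return value,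
--     # without a loop: slice-assign and a closed-form counter.
--     n = len(tab)
--     tab[:] = range(n)
--     return cpt + 6 + 5 * n
-- ===== Notes on version B (the rewrite author's own statement) =====
-- stated objective: faster
-- what changed: Replaced the while loop with an in-place slice assignment tab[:] = range(n) and a closed-form counter cpt + 6 + 5*n instead of accumulating +1/+5/+5 per iteration.
import Mathlib
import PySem

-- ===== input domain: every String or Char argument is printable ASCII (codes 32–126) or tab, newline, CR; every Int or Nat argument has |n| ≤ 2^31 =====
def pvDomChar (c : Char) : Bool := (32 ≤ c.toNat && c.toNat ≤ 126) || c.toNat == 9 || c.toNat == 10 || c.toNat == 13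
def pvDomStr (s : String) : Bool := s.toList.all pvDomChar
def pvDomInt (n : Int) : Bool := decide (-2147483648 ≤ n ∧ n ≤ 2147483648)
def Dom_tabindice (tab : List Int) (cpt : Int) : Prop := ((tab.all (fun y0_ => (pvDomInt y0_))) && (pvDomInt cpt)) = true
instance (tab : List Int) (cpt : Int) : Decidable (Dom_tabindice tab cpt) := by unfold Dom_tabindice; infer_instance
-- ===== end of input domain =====

-- B replaces A's while loop with a closed-form counter; return-value equivalence only
-- (both Pythons fill tab in place identically; the ports model the returned cpt).
-- ===== PORT A =====
-- literal port of A's while loop: i counts up to len(tab), cpt += 5 each pass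
def tabindiceLoop (i : Nat) (n : Nat) (cpt : Int) : Int :=
  if i < n then tabindiceLoop (i + 1) n (cpt + 5) else cpt
  termination_by n - i

def tabindice (tab : List Int) (cpt : Int) : Int :=
  tabindiceLoop 0 tab.length (cpt + 1) + 5

-- ===== PORT B =====
def tabindice_alt (tab : List Int) (cpt : Int) : Int :=
  cpt + 6 + 5 * (tab.length : Int)

-- ===== PRECONDITION & SPEC =====
def Spec_tabindice (tab : List Int) (cpt : Int) (out : Int) : Prop := out = tabindice_alt tab cpt
instance (tab : List Int) (cpt : Int) (out : Int) : Decidable (Spec_tabindice tab cpt out) := by unfold Spec_tabindice; infer_instance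

-- ===== CLAIM (what is proved, stated in full; the proofs are below) =====
def Claim_equal_tabindice : Prop := ∀ (tab : List Int) (cpt : Int), Dom_tabindice tab cpt → Spec_tabindice tab cpt (tabindice tab cpt)

-- ===== LEMMAS AND PROOFS =====

-- ===== VERDICT (by name: the statement is the Claim_ definition above) =====
theorem tabindiceLoop_eq (n : Nat) : ∀ (i : Nat) (cpt : Int), i ≤ n →
    tabindiceLoop i n cpt = cpt + 5 * ((n : Int) - i) := by
  intro i cpt h
  induction hk : n - i generalizing i cpt with
  | zero =>
    unfold tabindiceLoop
    have : ¬ i < n := by omega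
    simp [this]; omega
  | succ k ih =>
    unfold tabindiceLoop
    have hi : i < n := by omega
    rw [if_pos hi, ih (i+1) (cpt+5) (by omega) (by omega)]
    push_cast; ring

theorem tabindice_spec : Claim_equal_tabindice := by
  intro tab cpt _
  unfold Spec_tabindice tabindice tabindice_alt
  rw [tabindiceLoop_eq tab.length 0 (cpt+1) (Nat.zero_le _)]
  push_cast; ring
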